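-- pv_equiv track=rewrite | github.com/xiaotianluo0613/master-thesis | scripts/group_layer1_pairs_chunks_3_4.py | partition_3_4
-- ===== SOURCE A (Python) =====
-- from typing import List, Tuple
--
-- def partition_3_4(n: int) -> List[int]:
--     """Return a list of group sizes (3/4) summing to n.
--
--     Strategy: use as many 4s as possible while keeping remainder divisible by 3.
--     """
--     if n < 3:
--         raise ValueError(f"Cannot partition n={n} into groups of 3-4")
--
--     for num4 in range(n // 4, -1, -1):
--         rem = n - 4 * num4
--         if rem % 3 == 0:
--             num3 = rem // 3
--             sizes = [4] * num4 + [3] * num3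
--             # make sizes smoother by interleaving 4 and 3 when both exist
--             if num4 > 0 and num3 > 0:
--                 out: List[int] = []
--                 a = [4] * num4
--                 b = [3] * num3
--                 while a or b:
--                     if a:
--                         out.append(a.pop())
--                     if b:
--                         out.append(b.pop())
--                 return out
--             return sizes
--     raise ValueError(f"No 3/4 partition found for n={n}")
-- ===== SOURCE B (Python) =====
-- from typing import List
--
-- def partition_3_4(n: int) -> List[int]:
--     """Return a list of group sizes (3/4) summing to n (closed form, no search loop)."""
--     if n < 3:
--         raise ValueError(f"Cannot partition n={n} into groups of 3-4")
--     cap = n // 4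
--     num4 = cap - (cap - n) % 3
--     if num4 < 0:
--         raise ValueError(f"No 3/4 partition found for n={n}")
--     num3 = (n - 4 * num4) // 3
--     m = min(num4, num3)
--     return [4, 3] * m + ([4] * (num4 - m) if num4 > m else [3] * (num3 - m))
-- ===== Notes on version B (the rewrite author's own statement) =====
-- stated objective: simpler
-- what changed: Replaces A's descending linear search for num4 and the pop-based interleaving while-loop by a closed-form num4 = cap - (cap - n) % 3 and a direct construction [4,3]*min(num4,num3) plus the leftover block.
import Mathlib
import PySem

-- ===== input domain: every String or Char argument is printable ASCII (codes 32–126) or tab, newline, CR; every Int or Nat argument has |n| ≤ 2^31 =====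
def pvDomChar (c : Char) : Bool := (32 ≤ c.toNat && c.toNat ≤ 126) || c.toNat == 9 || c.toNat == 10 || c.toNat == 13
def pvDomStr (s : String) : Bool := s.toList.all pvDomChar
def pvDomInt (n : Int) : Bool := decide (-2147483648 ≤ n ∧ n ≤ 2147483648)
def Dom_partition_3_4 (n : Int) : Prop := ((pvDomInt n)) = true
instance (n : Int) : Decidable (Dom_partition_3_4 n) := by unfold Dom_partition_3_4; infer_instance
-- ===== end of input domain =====

-- B replaces A's descending search for num4 and the pop-based interleaving while-loop by a
-- closed-form num4 and a direct construction of the interleaved list (objective: simpler).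

-- ===== PORT A =====
-- A's while-loop: pops from the end of a, then of b, appending to out, until both are empty.
def pvInterLoop (a b out : List Int) : List Int :=
  if a = [] ∧ b = [] then out
  else
    let out1 := if a = [] then out else out ++ [a.getLast!]
    let a1 := a.dropLast
    let out2 := if b = [] then out1 else out1 ++ [b.getLast!]
    let b1 := b.dropLast
    pvInterLoop a1 b1 out2
termination_by a.length + b.length
decreasing_by
  rename_i h
  rcases a with _ | ⟨x, a⟩ <;> rcases b with _ | ⟨y, b⟩ <;>
    simp_all [List.length_dropLast] <;> omega

-- A's for-loop over range(n // 4, -1, -1), num4 counting down; [] stands for the raise path.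
def pvSearch (n : Int) (num4 : Nat) : List Int :=
  let rem := n - 4 * (num4 : Int)
  if PySem.Int.mod rem 3 = 0 then
    let num3 := PySem.Int.floordiv rem 3
    let sizes := List.replicate num4 (4 : Int) ++ List.replicate num3.toNat (3 : Int)
    if 0 < num4 ∧ 0 < num3 then
      pvInterLoop (List.replicate num4 (4 : Int)) (List.replicate num3.toNat (3 : Int)) []
    else sizes
  else
    match num4 with
    | 0 => []          -- range exhausted: Python raises ValueError here
    | k + 1 => pvSearch n k

def partition_3_4 (n : Int) : List Int :=
  if n < 3 then []     -- Python raises ValueError here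
  else pvSearch n (PySem.Int.floordiv n 4).toNat

-- ===== PORT B =====
def partition_3_4_alt (n : Int) : List Int :=
  if n < 3 then []     -- Python raises ValueError here
  else
    let cap := PySem.Int.floordiv n 4
    let num4 := cap - PySem.Int.mod (cap - n) 3
    if num4 < 0 then []  -- Python raises ValueError here
    else
      let num3 := PySem.Int.floordiv (n - 4 * num4) 3
      let m := min num4 num3
      (List.replicate m.toNat ([4, 3] : List Int)).flatten ++
        (if m < num4 then List.replicate (num4 - m).toNat (4 : Int)
         else List.replicate (num3 - m).toNat (3 : Int))

-- ===== PRECONDITION & SPEC =====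
-- Pre_ excludes exactly the inputs on which A raises ValueError: n < 3, and n = 5 (no partition).
def Pre_partition_3_4 (n : Int) : Prop := 3 ≤ n ∧ n ≠ 5
instance (n : Int) : Decidable (Pre_partition_3_4 n) := by unfold Pre_partition_3_4; infer_instance
def pvWitness_partition_3_4 : Int := 7

def Spec_partition_3_4 (n : Int) (out : List Int) : Prop := out = partition_3_4_alt n
instance (n : Int) (out : List Int) : Decidable (Spec_partition_3_4 n out) := by unfold Spec_partition_3_4; infer_instance

-- ===== CLAIM (what is proved, stated in full; the proofs are below) =====
def Claim_equal_partition_3_4 : Prop := ∀ (n : Int), Dom_partition_3_4 n → Pre_partition_3_4 n → Spec_partition_3_4 n (partition_3_4 n)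

-- ===== LEMMAS AND PROOFS =====

theorem pv_getLast?_cons_replicate (s : Nat) (x : Int) :
    (x :: List.replicate s x).getLast? = some x := by
  induction s with
  | zero => rfl
  | succ t ih => rw [List.replicate_succ, List.getLast?_cons_cons]; exact ih

-- The interleave while-loop on the two constant lists: [4,3] min p q times, then the leftovers.
theorem pvInterLoop_replicate (p q : Nat) (out : List Int) :
    pvInterLoop (List.replicate p (4 : Int)) (List.replicate q (3 : Int)) out =
      out ++ (List.replicate (min p q) ([4, 3] : List Int)).flatten ++
        (if q < p then List.replicate (p - min p q) (4 : Int)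
         else List.replicate (q - min p q) (3 : Int)) := by
  induction p generalizing q out with
  | zero =>
    induction q generalizing out with
    | zero => rw [pvInterLoop]; simp
    | succ s ih =>
      rw [pvInterLoop]
      have ih' := ih (out ++ [3])
      simp only [List.replicate_zero] at ih'
      simp [pv_getLast?_cons_replicate, ih', List.replicate_succ]
  | succ r ih =>
    cases q with
    | zero =>
      rw [pvInterLoop]
      have ih' := ih 0 (out ++ [4])
      simp only [List.replicate_zero] at ih'
      simp [pv_getLast?_cons_replicate, ih', List.replicate_succ]
    | succ s =>
      rw [pvInterLoop]
      have ih' := ih s (out ++ [4, 3])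
      simp [pv_getLast?_cons_replicate, ih', List.replicate_succ]

-- One successful step of A's search loop.
theorem pvSearch_hit (n : Int) (k : Nat) (hk : PySem.Int.mod (n - 4 * (k : Int)) 3 = 0) :
    pvSearch n k =
      (let num3 := PySem.Int.floordiv (n - 4 * (k : Int)) 3
       if 0 < k ∧ 0 < num3 then
         pvInterLoop (List.replicate k (4 : Int)) (List.replicate num3.toNat (3 : Int)) []
       else List.replicate k (4 : Int) ++ List.replicate num3.toNat (3 : Int)) := by
  rw [pvSearch.eq_def]
  simp
  intro hd
  have hk' := hk
  rw [PySem.Int.mod_eq_emod_of_pos (by norm_num)] at hk'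
  exact absurd (Int.dvd_of_emod_eq_zero hk') hd

-- One failing step of A's search loop.
theorem pvSearch_miss (n : Int) (k : Nat) (hk : ¬ PySem.Int.mod (n - 4 * ((k : Int) + 1)) 3 = 0) :
    pvSearch n (k + 1) = pvSearch n k := by
  rw [pvSearch.eq_def]
  push_cast
  rw [if_neg hk]

theorem partition_3_4_spec : Claim_equal_partition_3_4 := by
  intro n _ hpre
  unfold Spec_partition_3_4
  obtain ⟨hn, h5⟩ := hpre
  have h3 : (0 : Int) < 3 := by norm_num
  have h4 : (0 : Int) < 4 := by norm_num
  have hnge : ¬ n < 3 := by omega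
  unfold partition_3_4 partition_3_4_alt
  rw [if_neg hnge, if_neg hnge]
  simp only [PySem.Int.floordiv_eq_ediv_of_pos h4, PySem.Int.floordiv_eq_ediv_of_pos h3,
      PySem.Int.mod_eq_emod_of_pos h3]
  set cap : Int := n / 4 with hcap
  have hcap0 : 0 ≤ cap := by omega
  have hr : (cap - n) % 3 = 0 ∨ (cap - n) % 3 = 1 ∨ (cap - n) % 3 = 2 := by omega
  -- the closed-form num4 is nonnegative on Pre_
  have hk0 : 0 ≤ cap - (cap - n) % 3 := by omega
  rw [if_neg (by omega : ¬ cap - (cap - n) % 3 < 0)]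
  set k0 : Int := cap - (cap - n) % 3 with hk0def
  -- A's search stops exactly at k0
  have hsearch : pvSearch n cap.toNat = pvSearch n k0.toNat := by
    rcases hr with h | h | h
    · have : k0 = cap := by omega
      rw [this]
    · have hcap1 : 1 ≤ cap := by omega
      have hke : cap.toNat = k0.toNat + 1 := by omega
      have m1 : pvSearch n (k0.toNat + 1) = pvSearch n k0.toNat :=
        pvSearch_miss _ _ (by rw [PySem.Int.mod_eq_emod_of_pos h3]; omega)
      rw [hke, m1]
    · have hcap2 : 2 ≤ cap := by omega
      have hke : cap.toNat = k0.toNat + 1 + 1 := by omega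
      have m1 : pvSearch n (k0.toNat + 1 + 1) = pvSearch n (k0.toNat + 1) :=
        pvSearch_miss _ _ (by rw [PySem.Int.mod_eq_emod_of_pos h3]; push_cast; omega)
      have m2 : pvSearch n (k0.toNat + 1) = pvSearch n k0.toNat :=
        pvSearch_miss _ _ (by rw [PySem.Int.mod_eq_emod_of_pos h3]; omega)
      rw [hke, m1, m2]
  rw [hsearch]
  -- the stop is a hit
  have hhit : PySem.Int.mod (n - 4 * (k0.toNat : Int)) 3 = 0 := by
    rw [PySem.Int.mod_eq_emod_of_pos h3]
    have : (k0.toNat : Int) = k0 := by omega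
    rw [this]; omega
  rw [pvSearch_hit n k0.toNat hhit]
  rw [PySem.Int.floordiv_eq_ediv_of_pos h3]
  have hkcast : (k0.toNat : Int) = k0 := by omega
  rw [hkcast]
  set num3 : Int := (n - 4 * k0) / 3 with hnum3
  have hnum30 : 0 ≤ num3 := by omega
  -- compare the two constructions
  by_cases hpos : 0 < k0.toNat ∧ 0 < num3
  · rw [if_pos hpos]
    rw [pvInterLoop_replicate]
    have hminc : (min k0 num3).toNat = min k0.toNat num3.toNat := by omega
    simp only [List.nil_append, hminc,
      show (min k0 num3 < k0) ↔ (num3.toNat < k0.toNat) from by omega,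
      show (k0 - min k0 num3).toNat = k0.toNat - min k0.toNat num3.toNat from by omega,
      show (num3 - min k0 num3).toNat = num3.toNat - min k0.toNat num3.toNat from by omega]
  · rw [if_neg hpos]
    -- one of the two counts is zero: both sides are a single replicate block
    have hz : k0.toNat = 0 ∨ num3.toNat = 0 := by omega
    rcases hz with hz | hz
    · have hmin : min k0 num3 = k0 := by omega
      rw [hmin]
      rw [if_neg (by omega : ¬ k0 < k0)]
      have : (num3 - k0).toNat = num3.toNat := by omega
      rw [this, hz]
      simp
    · have hmin : min k0 num3 = num3 := by omega
      rw [hmin, hz]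
      by_cases hk : num3 < k0
      · rw [if_pos hk]
        have : (k0 - num3).toNat = k0.toNat := by omega
        rw [this]
        simp
      · rw [if_neg hk]
        have hke : k0.toNat = 0 := by omega
        have : (num3 - num3).toNat = 0 := by omega
        rw [this, hke]
        simp
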